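-- pv_equiv track=rewrite | github.com/poojabk7/Aptamer-ML-Project | Sequence_Processing/loop_count.py | count_loops_and_nucleotides
-- ===== SOURCE A (Python) =====
-- def count_loops_and_nucleotides(dot_bracket):
--     """
--     Count loops and nucleotides within loops based on dot-bracket notation.
--     Returns: (loop_count, nucleotide_count)
--     """
--     stack = []
--     loop_count = 0
--     nucleotide_count = 0
--     in_loop = False
--
--     for char in dot_bracket:
--         if char == "(":
--             stack.append("(")
--             in_loop = False
--         elif char == ")":
--             if stack:
--                 stack.pop()
--             in_loop = False
--         elif char == ".":
--             if stack:  # inside structured region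
--                 nucleotide_count += 1
--                 if not in_loop:
--                     loop_count += 1
--                     in_loop = True
--         else:
--             in_loop = False
--
--     return loop_count, nucleotide_count
-- ===== SOURCE B (Python) =====
-- from itertools import groupby
--
-- def count_loops_and_nucleotides(dot_bracket):
--     """
--     Count loops and nucleotides within loops based on dot-bracket notation.
--     Returns: (loop_count, nucleotide_count)
--     """
--     depth = 0
--     loop_count = 0
--     nucleotide_count = 0
--     for ch, grp in groupby(dot_bracket):
--         n = sum(1 for _ in grp)
--         if ch == "(":
--             depth += n
--         elif ch == ")":
--             depth = max(0, depth - n)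
--         elif ch == "." and depth > 0:
--             loop_count += 1
--             nucleotide_count += n
--     return loop_count, nucleotide_count
-- ===== Notes on version B (the rewrite author's own statement) =====
-- stated objective: alternative
-- what changed: B replaces A's explicit stack list and in_loop flag with a groupby-style pass over maximal runs of identical characters, maintaining only an integer depth (clamped at zero) and counting a whole dot-run at once.
import Mathlib
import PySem

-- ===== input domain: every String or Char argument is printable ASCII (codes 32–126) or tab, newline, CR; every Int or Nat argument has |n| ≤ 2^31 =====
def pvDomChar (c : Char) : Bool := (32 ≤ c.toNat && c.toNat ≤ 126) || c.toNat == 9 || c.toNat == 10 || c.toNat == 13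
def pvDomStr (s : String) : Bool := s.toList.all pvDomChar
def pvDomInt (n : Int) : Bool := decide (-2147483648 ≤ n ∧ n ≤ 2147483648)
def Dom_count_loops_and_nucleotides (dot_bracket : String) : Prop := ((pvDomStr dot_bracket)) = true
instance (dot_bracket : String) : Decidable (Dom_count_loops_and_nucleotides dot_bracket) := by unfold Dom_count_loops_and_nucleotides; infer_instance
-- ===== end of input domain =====

-- B replaces A's explicit stack list and in_loop flag with a pass over maximal runs of
-- identical characters (itertools.groupby), keeping only a clamped integer depth: a
-- genuinely different decomposition of the same O(n) counting task (objective: alternative).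


-- ===== PORT A =====
-- one loop iteration of A: state (stack, loop_count, nucleotide_count, in_loop)
def pvStepA (acc : List String × Int × Int × Bool) (c : Char) : List String × Int × Int × Bool :=
  let (stack, loop_count, nucleotide_count, in_loop) := acc
  if c = '(' then
    ("(" :: stack, loop_count, nucleotide_count, false)        -- stack.append("(")
  else if c = ')' then
    ((if stack.isEmpty then stack else stack.tail), loop_count, nucleotide_count, false)  -- if stack: stack.pop()
  else if c = '.' then
    if stack.isEmpty then (stack, loop_count, nucleotide_count, in_loop)
    else (stack, (if in_loop then loop_count else loop_count + 1), nucleotide_count + 1, true)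
  else
    (stack, loop_count, nucleotide_count, false)

def count_loops_and_nucleotides (dot_bracket : String) : Int × Int :=
  let r := dot_bracket.toList.foldl pvStepA ([], 0, 0, false)
  (r.2.1, r.2.2.1)

-- ===== PORT B =====
-- maximal runs of identical characters, as (char, run length) pairs (= itertools.groupby)
def pvRuns : List Char → List (Char × Int)
  | [] => []
  | c :: rest =>
    let p := rest.span (· = c)
    (c, (p.1.length : Int) + 1) :: pvRuns p.2
termination_by l => l.length
decreasing_by
  simp only [List.span_eq_takeWhile_dropWhile]
  exact Nat.lt_succ_of_le (List.length_dropWhile_le _ _)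

-- one run of B: state (depth, loop_count, nucleotide_count)
def pvStepB (acc : Int × Int × Int) (r : Char × Int) : Int × Int × Int :=
  let (depth, loop_count, nucleotide_count) := acc
  let (c, n) := r
  if c = '(' then (depth + n, loop_count, nucleotide_count)
  else if c = ')' then (max 0 (depth - n), loop_count, nucleotide_count)
  else if c = '.' then
    if depth > 0 then (depth, loop_count + 1, nucleotide_count + n) else acc
  else acc

def count_loops_and_nucleotides_alt (dot_bracket : String) : Int × Int :=
  let r := (pvRuns dot_bracket.toList).foldl pvStepB (0, 0, 0)
  (r.2.1, r.2.2)

-- ===== PRECONDITION & SPEC =====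
def Spec_count_loops_and_nucleotides (dot_bracket : String) (out : Int × Int) : Prop := out = count_loops_and_nucleotides_alt dot_bracket
instance (dot_bracket : String) (out : Int × Int) : Decidable (Spec_count_loops_and_nucleotides dot_bracket out) := by unfold Spec_count_loops_and_nucleotides; infer_instance

-- ===== CLAIM (what is proved, stated in full; the proofs are below) =====
def Claim_equal_count_loops_and_nucleotides : Prop := ∀ (dot_bracket : String), Dom_count_loops_and_nucleotides dot_bracket → Spec_count_loops_and_nucleotides dot_bracket (count_loops_and_nucleotides dot_bracket)

-- ===== LEMMAS AND PROOFS =====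

-- folding A's step over a run of '(' (starting with in_loop = false)
theorem pvRunOpen (l : List Char) (h : ∀ x ∈ l, x = '(') (st : List String) (lc nc : Int) :
    l.foldl pvStepA (st, lc, nc, false) = (List.replicate l.length "(" ++ st, lc, nc, false) := by
  induction l generalizing st with
  | nil => simp
  | cons c t ih =>
    have hc : c = '(' := h c (by simp)
    have hA : pvStepA (st, lc, nc, false) '(' = ("(" :: st, lc, nc, false) := by
      simp [pvStepA]
    rw [List.foldl_cons, hc, hA, ih (fun x hx => h x (by simp [hx]))]
    simp [List.replicate_succ', List.append_assoc]

-- folding A's step over a run of ')' (starting with in_loop = false)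
theorem pvRunClose (l : List Char) (h : ∀ x ∈ l, x = ')') (st : List String) (lc nc : Int) :
    l.foldl pvStepA (st, lc, nc, false) = (st.drop l.length, lc, nc, false) := by
  induction l generalizing st with
  | nil => simp
  | cons c t ih =>
    have hc : c = ')' := h c (by simp)
    have hA : pvStepA (st, lc, nc, false) ')' = (st.tail, lc, nc, false) := by
      cases st <;> simp [pvStepA]
    rw [List.foldl_cons, hc, hA, ih (fun x hx => h x (by simp [hx]))]
    cases st <;> simp

-- folding A's step over a run of '.' with nonempty stack, already in a loop
theorem pvRunDotTrue (l : List Char) (h : ∀ x ∈ l, x = '.') (st : List String)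
    (hst : st.isEmpty = false) (lc nc : Int) :
    l.foldl pvStepA (st, lc, nc, true) = (st, lc, nc + l.length, true) := by
  induction l generalizing nc with
  | nil => simp
  | cons c t ih =>
    have hc : c = '.' := h c (by simp)
    have hA : pvStepA (st, lc, nc, true) '.' = (st, lc, nc + 1, true) := by
      simp [pvStepA, hst]
    rw [List.foldl_cons, hc, hA, ih (fun x hx => h x (by simp [hx])) (nc + 1)]
    simp only [Prod.mk.injEq, List.length_cons, true_and, and_true]
    push_cast; ring

-- folding A's step over a run of '.' with empty stack is a no-op
theorem pvRunDotEmpty (l : List Char) (h : ∀ x ∈ l, x = '.') (lc nc : Int) (il : Bool) :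
    l.foldl pvStepA ([], lc, nc, il) = ([], lc, nc, il) := by
  induction l with
  | nil => simp
  | cons c t ih =>
    have hc : c = '.' := h c (by simp)
    simp [List.foldl_cons, pvStepA, hc, ih (fun x hx => h x (by simp [hx]))]

-- folding A's step over a run of any other character (starting with in_loop = false)
theorem pvRunOther (l : List Char) (c0 : Char) (h : ∀ x ∈ l, x = c0)
    (h1 : c0 ≠ '(') (h2 : c0 ≠ ')') (h3 : c0 ≠ '.') (st : List String) (lc nc : Int) :
    l.foldl pvStepA (st, lc, nc, false) = (st, lc, nc, false) := by
  induction l with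
  | nil => simp
  | cons c t ih =>
    have hc : c = c0 := h c (by simp)
    simp [List.foldl_cons, pvStepA, hc, h1, h2, h3, ih (fun x hx => h x (by simp [hx]))]

theorem pvHeadDropWhile {p : Char → Bool} {l : List Char} {a : Char}
    (h : (l.dropWhile p).head? = some a) : p a = false := by
  induction l with
  | nil => simp at h
  | cons c t ih =>
    by_cases hp : p c
    · exact ih (by simpa [List.dropWhile_cons, hp] using h)
    · simp only [List.dropWhile_cons, if_neg hp, List.head?_cons, Option.some.injEq] at h
      subst h
      simpa using hp

-- main invariant: A's char loop and B's run loop agree, depth = stack length,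
-- provided in_loop may only be true when the next character is not '.'
theorem pvMain (s : List Char) :
    ∀ (st : List String) (lc nc : Int) (il : Bool),
    (il = true → s.head? ≠ some '.') →
    (((s.foldl pvStepA (st, lc, nc, il)).1.length : Int),
      (s.foldl pvStepA (st, lc, nc, il)).2.1,
      (s.foldl pvStepA (st, lc, nc, il)).2.2.1)
    = (pvRuns s).foldl pvStepB ((st.length : Int), lc, nc) := by
  induction s using pvRuns.induct with
  | case1 => intro st lc nc il _; simp [pvRuns]
  | case2 c rest p ih =>
    intro st lc nc il hil
    have hp : p = (rest.takeWhile (· = c), rest.dropWhile (· = c)) :=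
      List.span_eq_takeWhile_dropWhile _ _
    rw [hp] at ih
    simp only at ih
    have hsplit : rest = rest.takeWhile (· = c) ++ rest.dropWhile (· = c) :=
      (List.takeWhile_append_dropWhile).symm
    have hmem : ∀ x ∈ rest.takeWhile (· = c), x = c := by
      intro x hx
      simpa using List.mem_takeWhile_imp hx
    have hhead : ∀ a, (rest.dropWhile (· = c)).head? = some a → a ≠ c := by
      intro a ha hac
      have := pvHeadDropWhile (p := (· = c)) (l := rest) ha
      simp [hac] at this
    have heq : pvRuns (c :: rest)
        = (c, ((rest.takeWhile (· = c)).length : Int) + 1)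
          :: pvRuns (rest.dropWhile (· = c)) := by
      rw [pvRuns]
      simp [List.span_eq_takeWhile_dropWhile]
    rw [heq]
    conv_lhs => rw [hsplit]
    simp only [List.foldl_cons, List.foldl_append]
    by_cases h1 : c = '('
    · subst h1
      have hA : pvStepA (st, lc, nc, il) '(' = ("(" :: st, lc, nc, false) := by
        simp [pvStepA]
      rw [hA, pvRunOpen _ hmem, ih _ _ _ _ (by simp)]
      have hB : pvStepB ((st.length : Int), lc, nc)
          ('(', ((rest.takeWhile (· = '(')).length : Int) + 1)
          = ((st.length : Int) + (((rest.takeWhile (· = '(')).length : Int) + 1), lc, nc) := by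
        simp [pvStepB]
      rw [hB]
      have hinit : (((List.replicate (rest.takeWhile (· = '(')).length "(" ++ "(" :: st).length : Nat) : Int)
          = (st.length : Int) + (((rest.takeWhile (· = '(')).length : Int) + 1) := by
        simp only [List.length_append, List.length_replicate, List.length_cons]
        push_cast; ring
      rw [hinit]
    · by_cases h2 : c = ')'
      · subst h2
        have hA : pvStepA (st, lc, nc, il) ')' = (st.tail, lc, nc, false) := by
          cases st <;> simp [pvStepA]
        rw [hA, pvRunClose _ hmem, ih _ _ _ _ (by simp)]
        have hB : pvStepB ((st.length : Int), lc, nc)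
            (')', ((rest.takeWhile (· = ')')).length : Int) + 1)
            = (max 0 ((st.length : Int) - (((rest.takeWhile (· = ')')).length : Int) + 1)), lc, nc) := by
          simp [pvStepB]
        rw [hB]
        have hinit : (((st.tail.drop (rest.takeWhile (· = ')')).length).length : Nat) : Int)
            = max 0 ((st.length : Int) - (((rest.takeWhile (· = ')')).length : Int) + 1)) := by
          cases st with
          | nil => simp
          | cons a t =>
            simp only [List.tail_cons, List.length_drop, List.length_cons]
            omega
        rw [hinit]
      · by_cases h3 : c = '.'
        · subst h3
          have hilf : il = false := by
            cases il
            · rfl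
            · exact absurd rfl (hil rfl)
          subst hilf
          cases hst : st with
          | nil =>
            have hA : pvStepA (([] : List String), lc, nc, false) '.'
                = ([], lc, nc, false) := by simp [pvStepA]
            rw [hA, pvRunDotEmpty _ hmem]
            have hB : pvStepB ((0 : Int), lc, nc)
                ('.', ((rest.takeWhile (· = '.')).length : Int) + 1)
                = (0, lc, nc) := by simp [pvStepB]
            simp only [List.length_nil, Int.natCast_zero, hB]
            exact ih _ _ _ _ (by simp)
          | cons a t =>
            have hA : pvStepA ((a :: t), lc, nc, false) '.'
                = (a :: t, lc + 1, nc + 1, true) := by simp [pvStepA]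
            rw [hA, pvRunDotTrue _ hmem (a :: t) (by simp) (lc + 1) (nc + 1),
              ih _ _ _ _ (by intro _ hh; exact absurd rfl (hhead '.' hh))]
            have hB : pvStepB (((a :: t).length : Int), lc, nc)
                ('.', ((rest.takeWhile (· = '.')).length : Int) + 1)
                = (((a :: t).length : Int), lc + 1,
                    nc + (((rest.takeWhile (· = '.')).length : Int) + 1)) := by
              simp [pvStepB]
            rw [hB,
              show nc + 1 + ((rest.takeWhile (· = '.')).length : Int)
                = nc + (((rest.takeWhile (· = '.')).length : Int) + 1) from by ring]
        · have hA : pvStepA (st, lc, nc, il) c = (st, lc, nc, false) := by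
            simp [pvStepA, h1, h2, h3]
          rw [hA, pvRunOther _ c hmem h1 h2 h3]
          have hB : pvStepB ((st.length : Int), lc, nc)
              (c, ((rest.takeWhile (· = c)).length : Int) + 1)
              = ((st.length : Int), lc, nc) := by
            simp [pvStepB, h1, h2, h3]
          rw [hB]
          exact ih _ _ _ _ (by simp)

-- ===== VERDICT (by name: the statement is the Claim_ definition above) =====
theorem count_loops_and_nucleotides_spec : Claim_equal_count_loops_and_nucleotides := by
  intro s _
  unfold Spec_count_loops_and_nucleotides count_loops_and_nucleotides count_loops_and_nucleotides_alt
  have h := pvMain s.toList [] 0 0 false (by intro hf; exact absurd hf (by decide))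
  simp only [List.length_nil, Int.natCast_zero] at h
  rw [← h]
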